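-- pv_equiv track=rewrite | github.com/memagu/ProblemSolving | Programmeringsolympiaden/Python/2023/qualifiers/Problem E Kattriket_[INCOMPLETE]_.py | get_graph_node_info
-- ===== SOURCE A (Python) =====
-- from typing import Dict, List, Tuple
--
-- def get_graph_node_info(node: str, parent: str, graph: Dict[str, List[str]]) -> Dict[str, Tuple[int, str, str]]:  # {node: (max_depth, deepest_leaf, parent)}
--     children = graph[node]
--
--     if not children:
--         return {node: (0, node, parent)}
--
--     info_map = {}
--     child_with_max_depth = (0, "")
--     for child in children:
--         info_map.update(get_graph_node_info(child, node, graph))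
--         child_info = info_map[child]
--
--         if child_info[0] <= child_with_max_depth[0]:
--             child_with_max_depth = (child_info[0], child_info[1])
--
--     info_map[node] = (child_with_max_depth[0] - 1, child_with_max_depth[1], parent)
--
--     return info_map
-- ===== SOURCE B (Python) =====
-- def get_graph_node_info(node, parent, graph):
--     # Iterative two-phase version: an explicit-stack DFS records the traversal
--     # (pre-order, rightmost child first), then one reverse pass over that record
--     # resolves every node bottom-up into the result dict.
--     order = []
--     stack = [(node, parent)]
--     while stack:
--         n, p = stack.pop()
--         order.append((n, p))
--         for c in graph[n]:
--             stack.append((c, n))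
--     info = {}
--     for n, p in reversed(order):
--         children = graph[n]
--         if not children:
--             info[n] = (0, n, p)
--         else:
--             best_d, best_l = 0, ""
--             for c in children:
--                 d, l = info[c][0], info[c][1]
--                 if d <= best_d:
--                     best_d, best_l = d, l
--             info[n] = (best_d - 1, best_l, p)
--     return info
-- ===== Notes on version B (the rewrite author's own statement) =====
-- stated objective: alternative
-- what changed: Replaces the recursive post-order DFS that threads a growing dict through recursive calls with an iterative two-phase algorithm: an explicit-stack DFS first records the traversal, then a single reverse pass over that record resolves every node bottom-up into one result dict.
import Mathlib
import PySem

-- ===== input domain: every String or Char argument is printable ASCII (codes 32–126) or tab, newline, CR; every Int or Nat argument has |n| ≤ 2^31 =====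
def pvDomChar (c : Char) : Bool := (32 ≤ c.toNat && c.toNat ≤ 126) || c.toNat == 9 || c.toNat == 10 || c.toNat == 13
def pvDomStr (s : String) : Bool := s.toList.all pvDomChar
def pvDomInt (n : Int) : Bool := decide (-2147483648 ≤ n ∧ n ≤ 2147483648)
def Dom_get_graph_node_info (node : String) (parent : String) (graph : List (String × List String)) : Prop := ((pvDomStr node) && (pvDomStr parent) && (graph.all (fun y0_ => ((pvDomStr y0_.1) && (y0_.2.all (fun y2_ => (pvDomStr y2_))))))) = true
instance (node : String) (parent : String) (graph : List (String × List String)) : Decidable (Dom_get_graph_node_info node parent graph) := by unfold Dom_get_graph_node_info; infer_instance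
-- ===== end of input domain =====

-- B replaces A's recursive post-order DFS (which threads a growing dict through the
-- recursive calls) by an iterative two-phase algorithm: an explicit-stack DFS records
-- the traversal, then one reverse pass over that record resolves every node bottom-up.

-- ===== PORT A =====
-- Fueled transliteration of A's recursion; fuel graph.length + 1 bounds the recursion
-- depth on every input admitted by Pre_ (a repetition-free path visits distinct keys).
def goA (graph : List (String × List String)) : Nat → String → String → PySem.Dict String (Int × String × String)
  | 0, _, _ => PySem.Dict.empty
  | f + 1, node, parent =>
    match (PySem.Dict.mk graph).get? node with
    | none => PySem.Dict.empty            -- KeyError in Python; excluded by Pre_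
    | some children =>
      match children with
      | [] => PySem.Dict.ofList [(node, ((0 : Int), node, parent))]
      | _ :: _ =>
        let st := children.foldl
          (fun acc child =>
            let m := acc.1.update (goA graph f child node).items
            let ci := m.getD child (0, "", "")
            (m, if ci.1 ≤ acc.2.1 then (ci.1, ci.2.1) else acc.2))
          ((PySem.Dict.empty : PySem.Dict String (Int × String × String)), ((0 : Int), ""))
        st.1.insert node (st.2.1 - 1, st.2.2, parent)

def get_graph_node_info (node : String) (parent : String) (graph : List (String × List String)) : List (String × Int × String × String) :=
  (goA graph (graph.length + 1) node parent).items

-- ===== PORT B =====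
-- szB graph g n bounds the number of phase-1 loop iterations (the DFS-tree size);
-- it is the fuel making Source B's while loop a recursion (the loop pops exactly one
-- stack entry per iteration on every input where the Python loop terminates).
def szB (graph : List (String × List String)) : Nat → String → Nat
  | 0, _ => 1
  | f + 1, n =>
    match (PySem.Dict.mk graph).get? n with
    | none => 1
    | some cs => 1 + (cs.map (szB graph f)).sum

-- Phase 1 of Source B: the while loop over the explicit stack, recording (n, p) pops.
def loopB (graph : List (String × List String)) : Nat → List (String × String) → List (String × String) → List (String × String)
  | 0, _, acc => acc                       -- fuel exhausted: the Python loop does not terminate here; outside Pre_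
  | _ + 1, [], acc => acc                  -- stack empty: loop ends
  | f + 1, (n, p) :: st, acc =>
    match (PySem.Dict.mk graph).get? n with
    | none => acc ++ [(n, p)]              -- KeyError in Python right after the append; outside Pre_
    | some cs => loopB graph f ((cs.map (fun c => (c, n))).reverse ++ st) (acc ++ [(n, p)])

-- Phase 2 of Source B: one step of the reverse pass, resolving node np.1 from its children.
def step2 (graph : List (String × List String)) (info : PySem.Dict String (Int × String × String)) (np : String × String) : PySem.Dict String (Int × String × String) :=
  match (PySem.Dict.mk graph).get? np.1 with
  | none => info                           -- KeyError in Python; outside Pre_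
  | some [] => info.insert np.1 ((0 : Int), np.1, np.2)
  | some cs =>
    let b := cs.foldl
      (fun acc c =>
        let ci := info.getD c ((0 : Int), "", "")   -- info[c]; present under Pre_
        if ci.1 ≤ acc.1 then (ci.1, ci.2.1) else acc)
      ((0 : Int), "")
    info.insert np.1 (b.1 - 1, b.2, np.2)

def get_graph_node_info_alt (node : String) (parent : String) (graph : List (String × List String)) : List (String × Int × String × String) :=
  ((loopB graph (szB graph (graph.length + 1) node) [(node, parent)] []).reverse.foldl (step2 graph) PySem.Dict.empty).items

-- ===== PRECONDITION & SPEC =====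
-- okFromN graph f seen n: every descending path from n (extending the path `seen`)
-- meets only keys of graph and never repeats a node, checked to depth f.  It computes
-- no values: it is the shape condition "the part of graph reachable from n is
-- key-closed and acyclic along paths" (depth graph.length + 1 is exhaustive, since a
-- repetition-free path visits pairwise-distinct keys).
def okFromN (graph : List (String × List String)) : Nat → List String → String → Bool
  | 0, _, _ => false
  | f + 1, seen, n =>
    !(seen.contains n) &&
    (match (PySem.Dict.mk graph).get? n with
     | none => false
     | some cs => cs.all (fun c => okFromN graph f (n :: seen) c))

-- Pre_ excludes exactly the inputs where A raises (KeyError on a reachable non-key,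
-- RecursionError on a reachable cycle); A returns on every input satisfying Pre_.
def Pre_get_graph_node_info (node : String) (parent : String) (graph : List (String × List String)) : Prop :=
  okFromN graph (graph.length + 1) [] node = true

instance (node : String) (parent : String) (graph : List (String × List String)) : Decidable (Pre_get_graph_node_info node parent graph) := by
  unfold Pre_get_graph_node_info; infer_instance

def pvWitness_get_graph_node_info : String × String × (List (String × List String)) :=
  ("a", "r", [("a", ["b", "c"]), ("b", []), ("c", [])])

def Spec_get_graph_node_info (node : String) (parent : String) (graph : List (String × List String)) (out : List (String × Int × String × String)) : Prop := out = get_graph_node_info_alt node parent graph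
instance (node : String) (parent : String) (graph : List (String × List String)) (out : List (String × Int × String × String)) : Decidable (Spec_get_graph_node_info node parent graph out) := by unfold Spec_get_graph_node_info; infer_instance

-- ===== CLAIM (what is proved, stated in full; the proofs are below) =====
def Claim_equal_get_graph_node_info : Prop := ∀ (node : String) (parent : String) (graph : List (String × List String)), Dom_get_graph_node_info node parent graph → Pre_get_graph_node_info node parent graph → Spec_get_graph_node_info node parent graph (get_graph_node_info node parent graph)

-- ===== LEMMAS AND PROOFS =====

-- Recursive description of phase 1's traversal record: pre-order, rightmost child first.
def preord (graph : List (String × List String)) : Nat → String → String → List (String × String)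
  | 0, n, p => [(n, p)]
  | f + 1, n, p =>
    match (PySem.Dict.mk graph).get? n with
    | none => [(n, p)]
    | some cs => (n, p) :: (cs.reverse.map (fun c => preord graph f c n)).flatten

-- (subtree depth, deepest leaf) of a node, the value both accumulators compute.
def dl (graph : List (String × List String)) : Nat → String → Int × String
  | 0, n => (0, n)
  | f + 1, n =>
    match (PySem.Dict.mk graph).get? n with
    | none => (0, n)
    | some [] => (0, n)
    | some (c :: cs) =>
      let b := (c :: cs).foldl (fun acc c' => let r := dl graph f c'; if r.1 ≤ acc.1 then r else acc) ((0 : Int), "")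
      (b.1 - 1, b.2)

def dlStep (graph : List (String × List String)) (g : Nat) (b : Int × String) (c : String) : Int × String :=
  if (dl graph g c).1 ≤ b.1 then dl graph g c else b

def chainA (graph : List (String × List String)) (g : Nat) (n : String) (d : PySem.Dict String (Int × String × String)) (cs : List String) : PySem.Dict String (Int × String × String) :=
  cs.foldl (fun d c => d.update (goA graph g c n).items) d

-- ---- dict algebra for fold-of-insert (update = foldl insert) ----

theorem dict_insert_comm {κ ν : Type} [BEq κ] [LawfulBEq κ] (d : PySem.Dict κ ν)
    (k a : κ) (u b : ν) (hne : k ≠ a) (ha : d.contains a = true) :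
    (d.insert k u).insert a b = (d.insert a b).insert k u := by
  apply PySem.Dict.ext
  have hca : (d.insert k u).contains a = true := by
    rw [PySem.Dict.contains_insert]; simp [ha]
  have hck : (d.insert a b).contains k = d.contains k := by
    rw [PySem.Dict.contains_insert]; simp [hne]
  by_cases hk : d.contains k = true
  · rw [PySem.Dict.items_insert (d.insert k u) a b, if_pos hca,
        PySem.Dict.items_insert d k u, if_pos hk,
        PySem.Dict.items_insert (d.insert a b) k u, hck, if_pos hk,
        PySem.Dict.items_insert d a b, if_pos ha]
    rw [List.map_map, List.map_map]
    apply List.map_congr_left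
    intro p _
    by_cases hpk : p.1 = k
    · simp [Function.comp, hpk, hne]
    · by_cases hpa : p.1 = a
      · simp [Function.comp, hpa, Ne.symm hne]
      · simp [Function.comp, hpa, hpk]
  · have hk' : d.contains k = false := by simpa using hk
    rw [PySem.Dict.items_insert (d.insert k u) a b, if_pos hca,
        PySem.Dict.items_insert d k u, if_neg (by simp [hk']),
        PySem.Dict.items_insert (d.insert a b) k u, hck, if_neg (by simp [hk']),
        PySem.Dict.items_insert d a b, if_pos ha]
    rw [List.map_append]
    simp [hne]

theorem foldl_ins_insert_comm {κ ν : Type} [BEq κ] [LawfulBEq κ] (a : κ) (b : ν) :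
    ∀ (tl : List (κ × ν)) (d : PySem.Dict κ ν), d.contains a = true →
      (∀ p ∈ tl, p.1 ≠ a) →
      (tl.foldl (fun d pr => d.insert pr.1 pr.2) d).insert a b
        = tl.foldl (fun d pr => d.insert pr.1 pr.2) (d.insert a b) := by
  intro tl
  induction tl with
  | nil => intro d _ _; rfl
  | cons q tl ih =>
    intro d ha hq
    have hq1 : q.1 ≠ a := hq q (by simp)
    have hcomm : ((d.insert q.1 q.2).insert a b) = (d.insert a b).insert q.1 q.2 :=
      dict_insert_comm d q.1 a q.2 b hq1 ha
    simp only [List.foldl_cons]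
    rw [ih (d.insert q.1 q.2) (by rw [PySem.Dict.contains_insert]; simp [ha])
        (fun p hp => hq p (by simp [hp])), hcomm]

theorem foldl_ins_subst {κ ν : Type} [BEq κ] [LawfulBEq κ] (a : κ) (b : ν) :
    ∀ (l : List (κ × ν)) (d : PySem.Dict κ ν),
      (l.map Prod.fst).Nodup → a ∈ l.map Prod.fst →
      (l.map (fun p => if p.1 == a then (a, b) else p)).foldl (fun d pr => d.insert pr.1 pr.2) d
        = (l.foldl (fun d pr => d.insert pr.1 pr.2) d).insert a b := by
  intro l
  induction l with
  | nil => intro d _ h; simp at h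
  | cons p tl ih =>
    intro d hnd hmem
    simp only [List.map_cons, List.nodup_cons] at hnd
    by_cases hpa : p.1 = a
    · have hta : ∀ q ∈ tl, q.1 ≠ a := by
        intro q hq hqa
        exact hnd.1 (hpa ▸ hqa ▸ List.mem_map_of_mem hq)
      have hmap : tl.map (fun p => if p.1 == a then (a, b) else p) = tl := by
        trans tl.map id
        · exact List.map_congr_left (fun q hq => by simp [hta q hq])
        · exact List.map_id tl
      have h1 : (if (p.1 == a) = true then (a, b) else p) = (a, b) := by simp [hpa]
      simp only [List.map_cons, List.foldl_cons, hmap, h1]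
      rw [hpa, foldl_ins_insert_comm a b tl (d.insert a p.2)
            (by rw [PySem.Dict.contains_insert]; simp) hta,
          PySem.Dict.insert_insert_self]
    · have hmem2 : a ∈ tl.map Prod.fst := by
        rcases List.mem_cons.mp hmem with h | h
        · exact absurd h.symm hpa
        · exact h
      have h1 : (if (p.1 == a) = true then (a, b) else p) = p := by simp [hpa]
      simp only [List.map_cons, List.foldl_cons, h1]
      exact ih (d.insert p.1 p.2) hnd.2 hmem2

theorem foldl_ins_insert {κ ν : Type} [BEq κ] [LawfulBEq κ] (e : PySem.Dict κ ν)
    (d : PySem.Dict κ ν) (a : κ) (b : ν) (hnd : e.keys.Nodup) :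
    ((e.insert a b).items).foldl (fun d pr => d.insert pr.1 pr.2) d
      = ((e.items).foldl (fun d pr => d.insert pr.1 pr.2) d).insert a b := by
  by_cases hc : e.contains a = true
  · rw [PySem.Dict.items_insert, if_pos hc]
    have hkeys : e.keys = e.items.map Prod.fst := rfl
    apply foldl_ins_subst a b e.items d (by rw [← hkeys]; exact hnd)
    rw [← hkeys]
    exact (PySem.Dict.contains_iff_mem_keys e a).mp hc
  · rw [PySem.Dict.items_insert, if_neg hc, List.foldl_append]
    rfl

theorem foldl_ins_assoc {κ ν : Type} [BEq κ] [LawfulBEq κ] :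
    ∀ (ps : List (κ × ν)) (e d : PySem.Dict κ ν), e.keys.Nodup →
      ps.foldl (fun d pr => d.insert pr.1 pr.2) ((e.items).foldl (fun d pr => d.insert pr.1 pr.2) d)
        = ((ps.foldl (fun d pr => d.insert pr.1 pr.2) e).items).foldl (fun d pr => d.insert pr.1 pr.2) d := by
  intro ps
  induction ps with
  | nil => intro e d _; rfl
  | cons q ps ih =>
    intro e d hnd
    simp only [List.foldl_cons]
    rw [← foldl_ins_insert e d q.1 q.2 hnd]
    exact ih (e.insert q.1 q.2) d (PySem.Dict.nodup_keys_insert e q.1 q.2 hnd)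

theorem get?_foldl_ins_of_not_mem {κ ν : Type} [BEq κ] [LawfulBEq κ] (k : κ) :
    ∀ (ps : List (κ × ν)) (d : PySem.Dict κ ν), (∀ p ∈ ps, p.1 ≠ k) →
      (ps.foldl (fun d pr => d.insert pr.1 pr.2) d).get? k = d.get? k := by
  intro ps
  induction ps with
  | nil => intro d _; rfl
  | cons q ps ih =>
    intro d h
    simp only [List.foldl_cons]
    rw [ih _ (fun p hp => h p (by simp [hp]))]
    exact PySem.Dict.get?_insert_of_ne d q.2 (Ne.symm (h q (by simp)))

theorem get?_foldl_ins_of_mem {κ ν : Type} [BEq κ] [LawfulBEq κ] (k : κ) (v : ν) :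
    ∀ (ps : List (κ × ν)) (d : PySem.Dict κ ν), (ps.map Prod.fst).Nodup → (k, v) ∈ ps →
      (ps.foldl (fun d pr => d.insert pr.1 pr.2) d).get? k = some v := by
  intro ps
  induction ps with
  | nil => intro d _ h; simp at h
  | cons q ps ih =>
    intro d hnd hmem
    simp only [List.map_cons, List.nodup_cons] at hnd
    rcases List.mem_cons.mp hmem with h | h
    · subst h
      simp only [List.foldl_cons]
      rw [get?_foldl_ins_of_not_mem k ps _ (by
        intro p hp hpk
        have hm := List.mem_map_of_mem (f := Prod.fst) hp
        rw [hpk] at hm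
        exact hnd.1 hm)]
      exact PySem.Dict.get?_insert_self d k v
    · simp only [List.foldl_cons]
      exact ih _ hnd.2 h

theorem foldl_ins_items_empty {κ ν : Type} [BEq κ] [LawfulBEq κ] (d : PySem.Dict κ ν)
    (hnd : d.keys.Nodup) :
    (d.items).foldl (fun d pr => d.insert pr.1 pr.2) (PySem.Dict.empty : PySem.Dict κ ν) = d := by
  apply PySem.Dict.ext
  have h := PySem.Dict.items_foldl_insert_fresh (l := d.items) (k := Prod.fst) (v := Prod.snd)
      (d := (PySem.Dict.empty : PySem.Dict κ ν)) (fun a _ => by simp [PySem.Dict.contains_empty]) hnd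
  simpa using h

theorem update_insert_dict {κ ν : Type} [BEq κ] [LawfulBEq κ] (e d : PySem.Dict κ ν)
    (a : κ) (b : ν) (hnd : e.keys.Nodup) :
    d.update ((e.insert a b).items) = (d.update e.items).insert a b := by
  show ((e.insert a b).items).foldl (fun d pr => d.insert pr.1 pr.2) d
      = ((e.items).foldl (fun d pr => d.insert pr.1 pr.2) d).insert a b
  exact foldl_ins_insert e d a b hnd

theorem get?_update {κ ν : Type} [BEq κ] [LawfulBEq κ] (x e : PySem.Dict κ ν) (k : κ)
    (hnd : e.keys.Nodup) :
    (x.update e.items).get? k = if e.contains k then e.get? k else x.get? k := by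
  by_cases hc : e.contains k = true
  · rw [if_pos hc]
    rw [PySem.Dict.contains_eq_isSome_get?] at hc
    obtain ⟨v, hv⟩ := Option.isSome_iff_exists.mp hc
    rw [hv]
    exact get?_foldl_ins_of_mem k v e.items x hnd (PySem.Dict.mem_items_of_get?_eq_some e hv)
  · rw [if_neg hc]
    apply get?_foldl_ins_of_not_mem k e.items x
    intro p hp hpk
    exact hc ((PySem.Dict.contains_iff_mem_keys e k).mpr (hpk ▸ PySem.Dict.mem_keys_of_mem_items _ hp))

-- ---- the loop lemmas: phase 1 computes preord ----

theorem loop_run (graph : List (String × List String)) :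
    ∀ (g : Nat) (seen : List String) (n : String), okFromN graph g seen n = true →
    ∀ (p : String) (st acc : List (String × String)) (f : Nat),
      loopB graph (szB graph g n + f) ((n, p) :: st) acc
        = loopB graph f st (acc ++ preord graph g n p) := by
  intro g
  induction g with
  | zero => intro seen n h; simp [okFromN] at h
  | succ g ih =>
    intro seen n hok p st acc f
    rw [okFromN, Bool.and_eq_true] at hok
    obtain ⟨-, hmatch⟩ := hok
    cases hg : (PySem.Dict.mk graph).get? n with
    | none => rw [hg] at hmatch; simp at hmatch
    | some cs =>
      rw [hg] at hmatch
      have hall : ∀ c ∈ cs, okFromN graph g (n :: seen) c = true := by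
        simpa [List.all_eq_true] using hmatch
      have inner : ∀ (m : List String), (∀ c ∈ m, okFromN graph g (n :: seen) c = true) →
          ∀ (st acc : List (String × String)) (f : Nat),
          loopB graph ((m.map (szB graph g)).sum + f) ((m.map (fun c => (c, n))) ++ st) acc
            = loopB graph f st (acc ++ (m.map (fun c => preord graph g c n)).flatten) := by
        intro m
        induction m with
        | nil => intro _ st acc f; simp
        | cons c m ihm =>
          intro hm st acc f
          have h1 : ((c :: m).map (szB graph g)).sum + f
              = szB graph g c + ((m.map (szB graph g)).sum + f) := by
            simp [List.sum_cons]; omega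
          rw [h1, List.map_cons, List.cons_append]
          rw [ih (n :: seen) c (hm c (by simp)) n ((m.map (fun c => (c, n))) ++ st) acc
              ((m.map (szB graph g)).sum + f)]
          rw [ihm (fun c' hc' => hm c' (by simp [hc'])) st (acc ++ preord graph g c n) f]
          simp [List.append_assoc]
      have hfuel : szB graph (g + 1) n + f = (((cs.reverse.map (szB graph g)).sum + f)) + 1 := by
        simp [szB, hg, List.map_reverse, List.sum_reverse]
        omega
      rw [hfuel]
      show loopB graph ((((cs.reverse.map (szB graph g)).sum + f)) + 1) ((n, p) :: st) acc = _
      rw [show loopB graph ((((cs.reverse.map (szB graph g)).sum + f)) + 1) ((n, p) :: st) acc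
            = loopB graph (((cs.reverse.map (szB graph g)).sum + f))
                ((cs.map (fun c => (c, n))).reverse ++ st) (acc ++ [(n, p)]) by
          simp [loopB, hg]]
      rw [show (cs.map (fun c => (c, n))).reverse = cs.reverse.map (fun c => (c, n)) by
          rw [List.map_reverse]]
      rw [inner cs.reverse (fun c hc => hall c (List.mem_reverse.mp hc)) st (acc ++ [(n, p)]) f]
      have hpre : preord graph (g + 1) n p
          = (n, p) :: (cs.reverse.map (fun c => preord graph g c n)).flatten := by
        simp [preord, hg]
      rw [hpre]
      simp [List.append_assoc]

-- ---- fuel/parent irrelevance of dl on ok nodes ----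

theorem dl_mono (graph : List (String × List String)) :
    ∀ (g : Nat) (seen : List String) (n : String), okFromN graph g seen n = true →
    ∀ (f : Nat), g ≤ f → dl graph f n = dl graph g n := by
  intro g
  induction g with
  | zero => intro seen n h; simp [okFromN] at h
  | succ g ih =>
    intro seen n hok f hf
    rw [okFromN, Bool.and_eq_true] at hok
    obtain ⟨-, hmatch⟩ := hok
    obtain ⟨f', rfl⟩ : ∃ f', f = f' + 1 := ⟨f - 1, by omega⟩
    cases hg : (PySem.Dict.mk graph).get? n with
    | none => rw [hg] at hmatch; simp at hmatch
    | some cs =>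
      rw [hg] at hmatch
      have hall : ∀ c ∈ cs, okFromN graph g (n :: seen) c = true := by
        simpa [List.all_eq_true] using hmatch
      cases cs with
      | nil => simp [dl, hg]
      | cons c0 cs2 =>
        simp only [dl, hg]
        have : ∀ (b : Int × String) (c : String), c ∈ c0 :: cs2 →
            (fun acc c' => let r := dl graph f' c'; if r.1 ≤ acc.1 then r else acc) b c
              = (fun acc c' => let r := dl graph g c'; if r.1 ≤ acc.1 then r else acc) b c := by
          intro b c hc
          simp only
          rw [ih (n :: seen) c (hall c hc) f' (by omega)]
        rw [PySem.List.foldl_congr_mem _ _ _ _ this]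

theorem dl_stable (graph : List (String × List String)) (g1 g2 : Nat) (s1 s2 : List String)
    (n : String) (h1 : okFromN graph g1 s1 n = true) (h2 : okFromN graph g2 s2 n = true) :
    dl graph g1 n = dl graph g2 n := by
  rcases Nat.le_total g1 g2 with h | h
  · exact (dl_mono graph g1 s1 n h1 g2 h).symm
  · exact dl_mono graph g2 s2 n h2 g1 h

-- ---- chain lemmas ----

theorem chain_nodup (graph : List (String × List String)) (g : Nat) (n : String) :
    ∀ (cs : List String) (d : PySem.Dict String (Int × String × String)),
      d.keys.Nodup → (chainA graph g n d cs).keys.Nodup := by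
  intro cs
  induction cs with
  | nil => intro d h; exact h
  | cons c cs ih =>
    intro d h
    exact ih _ (PySem.Dict.nodup_keys_update d _ h)

theorem chain_assoc (graph : List (String × List String)) (g : Nat) (n : String) :
    ∀ (cs : List String) (x d : PySem.Dict String (Int × String × String)), x.keys.Nodup →
      chainA graph g n (d.update x.items) cs = d.update (chainA graph g n x cs).items := by
  intro cs
  induction cs with
  | nil => intro x d _; rfl
  | cons c cs ih =>
    intro x d hnd
    have h1 : (d.update x.items).update (goA graph g c n).items
        = d.update (x.update (goA graph g c n).items).items := by
      show (goA graph g c n).items.foldl (fun d pr => d.insert pr.1 pr.2)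
          (x.items.foldl (fun d pr => d.insert pr.1 pr.2) d)
        = ((goA graph g c n).items.foldl (fun d pr => d.insert pr.1 pr.2) x).items.foldl
            (fun d pr => d.insert pr.1 pr.2) d
      exact foldl_ins_assoc _ x d hnd
    show chainA graph g n ((d.update x.items).update (goA graph g c n).items) cs = _
    rw [h1]
    exact ih (x.update (goA graph g c n).items) d (PySem.Dict.nodup_keys_update x _ hnd)

theorem chain_from_empty (graph : List (String × List String)) (g : Nat) (n : String)
    (cs : List String) (d : PySem.Dict String (Int × String × String)) :
    chainA graph g n d cs = d.update (chainA graph g n PySem.Dict.empty cs).items := by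
  have h := chain_assoc graph g n cs PySem.Dict.empty d (by simp [PySem.Dict.keys, PySem.Dict.empty])
  have h2 : (PySem.Dict.empty : PySem.Dict String (Int × String × String)).items = [] := rfl
  rw [h2] at h
  exact h

-- value coming out of the chain belongs to some child's dict (or was in d)
theorem chain_get_src (graph : List (String × List String)) (g : Nat) (n : String) :
    ∀ (cs : List String), (∀ c ∈ cs, (goA graph g c n).keys.Nodup) →
    ∀ (d : PySem.Dict String (Int × String × String)) (k : String) (v : Int × String × String),
      (chainA graph g n d cs).get? k = some v →
      d.get? k = some v ∨ ∃ c ∈ cs, (goA graph g c n).get? k = some v := by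
  intro cs
  induction cs with
  | nil => intro _ d k v h; exact Or.inl h
  | cons c cs ih =>
    intro hnd d k v h
    rcases ih (fun c' hc' => hnd c' (by simp [hc'])) (d.update (goA graph g c n).items) k v h with h1 | ⟨c', hc', hv'⟩
    · rw [get?_update d (goA graph g c n) k (hnd c (by simp))] at h1
      by_cases hcc : (goA graph g c n).contains k = true
      · rw [if_pos hcc] at h1
        exact Or.inr ⟨c, by simp, h1⟩
      · rw [if_neg hcc] at h1
        exact Or.inl h1
    · exact Or.inr ⟨c', by simp [hc'], hv'⟩

-- the chain read at any child of n returns a value whose (depth, leaf) pair is dl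
theorem chain_read (graph : List (String × List String)) (g : Nat) (n : String) (seen : List String) :
    ∀ (cs : List String),
      (∀ c ∈ cs, (goA graph g c n).get? c = some ((dl graph g c).1, (dl graph g c).2, n)
        ∧ (goA graph g c n).keys.Nodup
        ∧ (∀ m v, (goA graph g c n).get? m = some v →
            ∃ g2 s2, okFromN graph g2 s2 m = true ∧ (v.1, v.2.1) = dl graph g2 m)) →
    ∀ (d : PySem.Dict String (Int × String × String)) (c0 : String),
      okFromN graph g (n :: seen) c0 = true →
      ((∃ v0, d.get? c0 = some v0 ∧ (v0.1, v0.2.1) = dl graph g c0) ∨ c0 ∈ cs) →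
      ∃ v, (chainA graph g n d cs).get? c0 = some v ∧ (v.1, v.2.1) = dl graph g c0 := by
  intro cs
  induction cs with
  | nil =>
    intro _ d c0 _ hcase
    rcases hcase with ⟨v0, hv, hp⟩ | h
    · exact ⟨v0, hv, hp⟩
    · simp at h
  | cons c cs ih =>
    intro hp d c0 hok hcase
    obtain ⟨hroot, hnd, hent⟩ := hp c (by simp)
    apply ih (fun c' hc' => hp c' (by simp [hc'])) (d.update (goA graph g c n).items) c0 hok
    by_cases hmem : c0 ∈ cs
    · exact Or.inr hmem
    · left
      by_cases hcc : (goA graph g c n).contains c0 = true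
      · have hs := hcc
        rw [PySem.Dict.contains_eq_isSome_get?] at hs
        obtain ⟨v, hv⟩ := Option.isSome_iff_exists.mp hs
        refine ⟨v, ?_, ?_⟩
        · rw [get?_update d _ c0 hnd, if_pos hcc]
          exact hv
        · obtain ⟨g2, s2, hok2, hpair⟩ := hent c0 v hv
          rw [hpair]
          exact dl_stable graph g2 g s2 (n :: seen) c0 hok2 hok
      · rcases hcase with ⟨v0, hv0, hp0⟩ | hmem'
        · refine ⟨v0, ?_, hp0⟩
          rw [get?_update d _ c0 hnd, if_neg (by simp [hcc])]
          exact hv0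
        · have hc0c : c0 = c := by
            rcases List.mem_cons.mp hmem' with h | h
            · exact h
            · exact absurd h hmem
          subst hc0c
          exfalso
          apply hcc
          rw [PySem.Dict.contains_eq_isSome_get?, hroot]
          rfl

-- A's child loop: the dict component is the update chain, the accumulator is the dl fold.
theorem foldA_char (graph : List (String × List String)) (g : Nat) (n : String) :
    ∀ (cs : List String),
      (∀ c ∈ cs, (goA graph g c n).get? c = some ((dl graph g c).1, (dl graph g c).2, n)
        ∧ (goA graph g c n).keys.Nodup) →
    ∀ (acc : PySem.Dict String (Int × String × String) × Int × String),
      cs.foldl (fun acc child =>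
          let m := acc.1.update (goA graph g child n).items
          let ci := m.getD child (0, "", "")
          (m, if ci.1 ≤ acc.2.1 then (ci.1, ci.2.1) else acc.2)) acc
        = (chainA graph g n acc.1 cs, cs.foldl (dlStep graph g) acc.2) := by
  intro cs
  induction cs with
  | nil => intro _ acc; rfl
  | cons c cs ih =>
    intro hp acc
    simp only [List.foldl_cons]
    have hcc : (goA graph g c n).contains c = true := by
      rw [PySem.Dict.contains_eq_isSome_get?, (hp c (by simp)).1]; rfl
    have hread : (acc.1.update (goA graph g c n).items).getD c ((0 : Int), "", "")
        = ((dl graph g c).1, (dl graph g c).2, n) := by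
      rw [PySem.Dict.getD_eq_get?_getD, get?_update acc.1 _ c (hp c (by simp)).2, if_pos hcc,
          (hp c (by simp)).1]
      rfl
    have hbody : (let m := acc.1.update (goA graph g c n).items
        let ci := m.getD c (0, "", "")
        ((m, if ci.1 ≤ acc.2.1 then (ci.1, ci.2.1) else acc.2) :
          PySem.Dict String (Int × String × String) × Int × String))
        = (acc.1.update (goA graph g c n).items, dlStep graph g acc.2 c) := by
      simp only [hread, dlStep]
    rw [hbody, ih (fun c' hc' => hp c' (by simp [hc'])) (acc.1.update (goA graph g c n).items, dlStep graph g acc.2 c)]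
    rfl

-- phase 2 over the concatenation of the children's reversed pre-orders is the chain.
theorem foldFlat (graph : List (String × List String)) (g : Nat) (n : String) :
    ∀ (l : List String),
      (∀ c ∈ l, ∀ d, (preord graph g c n).reverse.foldl (step2 graph) d
          = d.update (goA graph g c n).items) →
    ∀ d, ((l.map (fun c => (preord graph g c n).reverse)).flatten).foldl (step2 graph) d
      = chainA graph g n d l := by
  intro l
  induction l with
  | nil => intro _ d; rfl
  | cons c l ih =>
    intro h d
    simp only [List.map_cons, List.flatten_cons, List.foldl_append]
    rw [h c (by simp) d]
    exact ih (fun c' hc' d' => h c' (by simp [hc']) d') _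

-- ---- the main induction ----

theorem gen2 (graph : List (String × List String)) :
    ∀ (g : Nat) (seen : List String) (n : String), okFromN graph g seen n = true → ∀ (p : String),
      (goA graph g n p).get? n = some ((dl graph g n).1, (dl graph g n).2, p)
      ∧ (goA graph g n p).keys.Nodup
      ∧ (∀ m v, (goA graph g n p).get? m = some v →
          ∃ g2 s2, okFromN graph g2 s2 m = true ∧ (v.1, v.2.1) = dl graph g2 m)
      ∧ (∀ d, (preord graph g n p).reverse.foldl (step2 graph) d = d.update (goA graph g n p).items) := by
  intro g
  induction g with
  | zero => intro seen n h; simp [okFromN] at h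
  | succ g ih =>
    intro seen n hok p
    have hok0 := hok
    rw [okFromN, Bool.and_eq_true] at hok
    obtain ⟨-, hmatch⟩ := hok
    cases hg : (PySem.Dict.mk graph).get? n with
    | none => rw [hg] at hmatch; simp at hmatch
    | some cs =>
      rw [hg] at hmatch
      have hall : ∀ c ∈ cs, okFromN graph g (n :: seen) c = true := by
        simpa [List.all_eq_true] using hmatch
      cases cs with
      | nil =>
        have hA : goA graph (g + 1) n p = PySem.Dict.empty.insert n ((0 : Int), n, p) := by
          simp [goA, hg]
          rfl
        have hdl : dl graph (g + 1) n = ((0 : Int), n) := by simp [dl, hg]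
        refine ⟨?_, ?_, ?_, ?_⟩
        · rw [hA, PySem.Dict.get?_insert_self, hdl]
        · rw [hA]
          exact PySem.Dict.nodup_keys_insert _ _ _ PySem.Dict.nodup_keys_empty
        · intro m v hm
          rw [hA] at hm
          by_cases hmn : m = n
          · subst hmn
            rw [PySem.Dict.get?_insert_self] at hm
            refine ⟨g + 1, seen, hok0, ?_⟩
            rw [hdl]
            cases hm
            rfl
          · rw [PySem.Dict.get?_insert_of_ne _ _ hmn, PySem.Dict.get?_empty] at hm
            exact absurd hm (by simp)
        · intro d
          have hpre : preord graph (g + 1) n p = [(n, p)] := by simp [preord, hg]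
          rw [hpre]
          show step2 graph d (n, p) = d.update (goA graph (g + 1) n p).items
          rw [hA, update_insert_dict _ d n _ PySem.Dict.nodup_keys_empty]
          simp [step2, hg]
          rfl
      | cons c0 cs2 =>
        have hpack : ∀ c ∈ c0 :: cs2,
            (goA graph g c n).get? c = some ((dl graph g c).1, (dl graph g c).2, n)
            ∧ (goA graph g c n).keys.Nodup
            ∧ (∀ m v, (goA graph g c n).get? m = some v →
                ∃ g2 s2, okFromN graph g2 s2 m = true ∧ (v.1, v.2.1) = dl graph g2 m) := by
          intro c hc
          obtain ⟨h1, h2, h3, _⟩ := ih (n :: seen) c (hall c hc) n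
          exact ⟨h1, h2, h3⟩
        have hstep : dlStep graph g = fun (acc : Int × String) c' =>
            if (dl graph g c').1 ≤ acc.1 then dl graph g c' else acc := by
          funext b c
          rw [dlStep]
        have hdl : dl graph (g + 1) n
            = (((c0 :: cs2).foldl (dlStep graph g) ((0 : Int), "")).1 - 1,
               ((c0 :: cs2).foldl (dlStep graph g) ((0 : Int), "")).2) := by
          rw [hstep]
          simp [dl, hg]
        have hA : goA graph (g + 1) n p
            = (chainA graph g n PySem.Dict.empty (c0 :: cs2)).insert n
                (((c0 :: cs2).foldl (dlStep graph g) ((0 : Int), "")).1 - 1,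
                 ((c0 :: cs2).foldl (dlStep graph g) ((0 : Int), "")).2, p) := by
          simp only [goA, hg]
          rw [foldA_char graph g n (c0 :: cs2) (fun c hc => ⟨(hpack c hc).1, (hpack c hc).2.1⟩)
              ((PySem.Dict.empty : PySem.Dict String (Int × String × String)), ((0 : Int), ""))]
        have hchainnd : (chainA graph g n PySem.Dict.empty (c0 :: cs2)).keys.Nodup :=
          chain_nodup graph g n (c0 :: cs2) PySem.Dict.empty PySem.Dict.nodup_keys_empty
        refine ⟨?_, ?_, ?_, ?_⟩
        · rw [hA, PySem.Dict.get?_insert_self, hdl]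
        · rw [hA]
          exact PySem.Dict.nodup_keys_insert _ _ _ hchainnd
        · intro m v hm
          rw [hA] at hm
          by_cases hmn : m = n
          · subst hmn
            rw [PySem.Dict.get?_insert_self] at hm
            refine ⟨g + 1, seen, hok0, ?_⟩
            rw [hdl]
            cases hm
            rfl
          · rw [PySem.Dict.get?_insert_of_ne _ _ hmn] at hm
            rcases chain_get_src graph g n (c0 :: cs2) (fun c hc => (hpack c hc).2.1)
                PySem.Dict.empty m v hm with h | ⟨c, hc, hcv⟩
            · rw [PySem.Dict.get?_empty] at h
              exact absurd h (by simp)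
            · exact (hpack c hc).2.2 m v hcv
        · intro d
          have hpre : (preord graph (g + 1) n p).reverse
              = ((c0 :: cs2).map (fun c => (preord graph g c n).reverse)).flatten ++ [(n, p)] := by
            have : preord graph (g + 1) n p
                = (n, p) :: ((c0 :: cs2).reverse.map (fun c => preord graph g c n)).flatten := by
              simp [preord, hg]
            rw [this]
            simp [List.reverse_cons, List.reverse_flatten, List.map_map, List.map_reverse,
              Function.comp_def]
          rw [hpre, List.foldl_append,
            foldFlat graph g n (c0 :: cs2) (fun c hc => (ih (n :: seen) c (hall c hc) n).2.2.2) d]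
          show step2 graph (chainA graph g n d (c0 :: cs2)) (n, p) = _
          have hb : (c0 :: cs2).foldl
              (fun acc c =>
                let ci := (chainA graph g n d (c0 :: cs2)).getD c ((0 : Int), "", "")
                if ci.1 ≤ acc.1 then (ci.1, ci.2.1) else acc) ((0 : Int), "")
              = (c0 :: cs2).foldl (dlStep graph g) ((0 : Int), "") := by
            apply PySem.List.foldl_congr_mem
            intro acc c hc
            obtain ⟨v, hv, hpair⟩ := chain_read graph g n seen (c0 :: cs2)
              (fun c' hc' => hpack c' hc') d c (hall c hc) (Or.inr hc)
            simp only [PySem.Dict.getD_eq_get?_getD, hv, Option.getD_some, dlStep]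
            have h1 : v.1 = (dl graph g c).1 := congrArg Prod.fst hpair
            have h2 : v.2.1 = (dl graph g c).2 := congrArg Prod.snd hpair
            rw [h1, h2]
          have hs2 : step2 graph (chainA graph g n d (c0 :: cs2)) (n, p)
              = (chainA graph g n d (c0 :: cs2)).insert n
                  (((c0 :: cs2).foldl
                      (fun acc c =>
                        let ci := (chainA graph g n d (c0 :: cs2)).getD c ((0 : Int), "", "")
                        if ci.1 ≤ acc.1 then (ci.1, ci.2.1) else acc) ((0 : Int), "")).1 - 1,
                   ((c0 :: cs2).foldl
                      (fun acc c =>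
                        let ci := (chainA graph g n d (c0 :: cs2)).getD c ((0 : Int), "", "")
                        if ci.1 ≤ acc.1 then (ci.1, ci.2.1) else acc) ((0 : Int), "")).2, p) := by
            simp only [step2]
            rw [hg]
          rw [hs2, hb, hA, update_insert_dict _ d n _ hchainnd, ← chain_from_empty]

-- ===== VERDICT (by name: the statement is the Claim_ definition above) =====
theorem get_graph_node_info_spec : Claim_equal_get_graph_node_info := by
  intro node parent graph _hdom hpre
  unfold Spec_get_graph_node_info get_graph_node_info get_graph_node_info_alt
  have hrun := loop_run graph (graph.length + 1) [] node hpre parent [] [] 0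
  have hg := gen2 graph (graph.length + 1) [] node hpre parent
  have horder : loopB graph (szB graph (graph.length + 1) node) [(node, parent)] []
      = preord graph (graph.length + 1) node parent := by
    have : szB graph (graph.length + 1) node + 0 = szB graph (graph.length + 1) node := by omega
    rw [← this]
    rw [hrun]
    rfl
  rw [horder, hg.2.2.2 PySem.Dict.empty]
  have : (PySem.Dict.empty : PySem.Dict String (Int × String × String)).update
      (goA graph (graph.length + 1) node parent).items = goA graph (graph.length + 1) node parent := by
    show (goA graph (graph.length + 1) node parent).items.foldl (fun d pr => d.insert pr.1 pr.2) PySem.Dict.empty = _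
    exact foldl_ins_items_empty _ hg.2.1
  rw [this]
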